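-- pv_equiv track=rewrite | github.com/yoounhk/algorithms-python | src/Programmers/L2_T6/P1.py | solution
-- ===== SOURCE A (Python) =====
-- def solution(n):
--     result = []
--     for i in range(1, n):
--         if i % 3 == 1:
--             result.append(1)
--         elif i % 3 == 2:
--             result.append(2)
--         elif i % 3 == 0:
--             result.append(3)
--     return result
-- ===== SOURCE B (Python) =====
-- def solution(n):
--     m = max(0, n - 1)
--     return [1, 2, 3] * (m // 3) + [1, 2, 3][:m % 3]
-- ===== Notes on version B (the rewrite author's own statement) =====
-- stated objective: simpler
-- what changed: Replaces the per-index loop with its modulo-based if/elif chain by list repetition: whole three-element cycles counted by floor division plus a sliced partial tail.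
import Mathlib
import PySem

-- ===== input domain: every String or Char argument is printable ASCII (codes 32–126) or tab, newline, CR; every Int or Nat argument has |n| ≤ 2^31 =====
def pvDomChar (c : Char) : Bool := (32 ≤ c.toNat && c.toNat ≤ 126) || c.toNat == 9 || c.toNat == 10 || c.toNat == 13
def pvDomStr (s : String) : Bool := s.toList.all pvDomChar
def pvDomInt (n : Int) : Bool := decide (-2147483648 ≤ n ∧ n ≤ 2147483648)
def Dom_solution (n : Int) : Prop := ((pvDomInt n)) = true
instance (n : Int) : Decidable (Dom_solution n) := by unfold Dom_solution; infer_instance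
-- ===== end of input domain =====

-- B builds the answer by whole [1,2,3] cycles plus a partial tail instead of a per-index modulo test (objective: simpler).

-- ===== PORT A =====
def solution (n : Int) : List Int :=
  (PySem.List.pyRange 1 n 1).foldl (fun result i =>
    if PySem.Int.mod i 3 = 1 then result ++ [1]
    else if PySem.Int.mod i 3 = 2 then result ++ [2]
    else if PySem.Int.mod i 3 = 0 then result ++ [3]
    else result) []

-- ===== PORT B =====
def solution_alt (n : Int) : List Int :=
  let m := max 0 (n - 1)
  (List.replicate (PySem.Int.floordiv m 3).toNat ([1, 2, 3] : List Int)).flatten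
    ++ ([1, 2, 3] : List Int).take (PySem.Int.mod m 3).toNat

-- ===== PRECONDITION & SPEC =====
def Spec_solution (n : Int) (out : List Int) : Prop := out = solution_alt n
instance (n : Int) (out : List Int) : Decidable (Spec_solution n out) := by unfold Spec_solution; infer_instance

-- ===== CLAIM (what is proved, stated in full; the proofs are below) =====
def Claim_equal_solution : Prop := ∀ (n : Int), Dom_solution n → Spec_solution n (solution n)

-- ===== LEMMAS AND PROOFS =====

theorem pv_flatMap_singleton {α β : Type} (f : α → β) (l : List α) :
    l.flatMap (fun x => [f x]) = l.map f := by
  induction l with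
  | nil => rfl
  | cons a t ih => simp [ih]

-- the repeating pattern of length m, characterised pointwise
theorem pv_patt (m : Nat) :
    (List.range m).map (fun k => ((k % 3 : Nat) : Int) + 1)
      = (List.replicate (m / 3) ([1, 2, 3] : List Int)).flatten
          ++ ([1, 2, 3] : List Int).take (m % 3) := by
  induction m with
  | zero => simp
  | succ m ih =>
    rw [List.range_succ, List.map_append, ih]
    have hr : m % 3 = 0 ∨ m % 3 = 1 ∨ m % 3 = 2 := by omega
    rcases hr with h | h | h
    · have h1 : (m + 1) % 3 = 1 := by omega
      have h2 : (m + 1) / 3 = m / 3 := by omega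
      simp [h, h1, h2]; omega
    · have h1 : (m + 1) % 3 = 2 := by omega
      have h2 : (m + 1) / 3 = m / 3 := by omega
      simp [h, h1, h2]; omega
    · have h1 : (m + 1) % 3 = 0 := by omega
      have h2 : (m + 1) / 3 = m / 3 + 1 := by omega
      simp [h, h1, h2, List.replicate_succ' (n := m / 3)]; omega

theorem pv_g_cast (k : Nat) :
    (if PySem.Int.mod (1 + (k : Int)) 3 = 1 then ([1] : List Int)
     else if PySem.Int.mod (1 + (k : Int)) 3 = 2 then [2]
     else if PySem.Int.mod (1 + (k : Int)) 3 = 0 then [3]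
     else []) = [((k % 3 : Nat) : Int) + 1] := by
  have hc : (1 + (k : Int)) = ((1 + k : Nat) : Int) := by push_cast; ring
  have hm : PySem.Int.mod (((1 + k : Nat) : Int)) 3 = (((1 + k) % 3 : Nat) : Int) := by
    exact_mod_cast PySem.Int.mod_natCast (1 + k) 3
  rw [hc, hm]
  have hr : k % 3 = 0 ∨ k % 3 = 1 ∨ k % 3 = 2 := by omega
  rcases hr with h | h | h <;>
    · have h1 : (1 + k) % 3 = (k % 3 + 1) % 3 := by omega
      simp [h1, h]

theorem solution_eq (n : Int) : solution n = solution_alt n := by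
  unfold solution solution_alt
  have hbody : (fun (result : List Int) (i : Int) =>
      if PySem.Int.mod i 3 = 1 then result ++ [1]
      else if PySem.Int.mod i 3 = 2 then result ++ [2]
      else if PySem.Int.mod i 3 = 0 then result ++ [3]
      else result)
      = fun (result : List Int) (i : Int) => result ++
          (if PySem.Int.mod i 3 = 1 then [1]
           else if PySem.Int.mod i 3 = 2 then [2]
           else if PySem.Int.mod i 3 = 0 then [3]
           else []) := by
    funext acc i; split_ifs <;> simp
  rw [hbody, PySem.List.foldl_append_eq_flatMap, PySem.List.pyRange_one, List.flatMap_map]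
  have hm : max 0 (n - 1) = (((n - 1).toNat : Nat) : Int) := by omega
  have hf : PySem.Int.floordiv (((n - 1).toNat : Nat) : Int) 3 = (((n - 1).toNat / 3 : Nat) : Int) := by
    exact_mod_cast PySem.Int.floordiv_natCast (n - 1).toNat 3
  have hmo : PySem.Int.mod (((n - 1).toNat : Nat) : Int) 3 = (((n - 1).toNat % 3 : Nat) : Int) := by
    exact_mod_cast PySem.Int.mod_natCast (n - 1).toNat 3
  simp only [hm, hf, hmo, Int.toNat_natCast]
  rw [← pv_patt]
  have hmap : List.map (fun k => ((k % 3 : Nat) : Int) + 1) (List.range (n - 1).toNat)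
      = List.flatMap (fun k => [((k % 3 : Nat) : Int) + 1]) (List.range (n - 1).toNat) := by
    exact (pv_flatMap_singleton _ _).symm
  rw [hmap, List.nil_append, List.flatMap_def, List.flatMap_def]
  congr 1
  apply List.map_congr_left
  intro k _
  exact pv_g_cast k

-- ===== VERDICT (by name: the statement is the Claim_ definition above) =====
theorem solution_spec : Claim_equal_solution := by
  intro n _
  unfold Spec_solution
  exact solution_eq n
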